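-- pv_equiv track=rewrite | github.com/hahhen/dailyhabits | app.py | largest_power_of_10
-- ===== SOURCE A (Python) =====
-- def largest_power_of_10(n):
--         if n == 0:
--             return 1
--         power = 1
--         while n % 10 == 0:
--             power *= 10
--             n //= 10
--         return power
-- ===== SOURCE B (Python) =====
-- def largest_power_of_10(n):
--     if n == 0:
--         return 1
--     count2 = 0
--     m = n
--     while m % 2 == 0:
--         count2 += 1
--         m //= 2
--     count5 = 0
--     m = n
--     while m % 5 == 0:
--         count5 += 1
--         m //= 5
--     return 10 ** min(count2, count5)
-- ===== Notes on version B (the rewrite author's own statement) =====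
-- stated objective: alternative
-- what changed: Instead of one divide-by-10 loop multiplying an accumulator, B computes the 2-adic and 5-adic valuations in two separate counting loops and returns 10 ** min(count2, count5).
import Mathlib
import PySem

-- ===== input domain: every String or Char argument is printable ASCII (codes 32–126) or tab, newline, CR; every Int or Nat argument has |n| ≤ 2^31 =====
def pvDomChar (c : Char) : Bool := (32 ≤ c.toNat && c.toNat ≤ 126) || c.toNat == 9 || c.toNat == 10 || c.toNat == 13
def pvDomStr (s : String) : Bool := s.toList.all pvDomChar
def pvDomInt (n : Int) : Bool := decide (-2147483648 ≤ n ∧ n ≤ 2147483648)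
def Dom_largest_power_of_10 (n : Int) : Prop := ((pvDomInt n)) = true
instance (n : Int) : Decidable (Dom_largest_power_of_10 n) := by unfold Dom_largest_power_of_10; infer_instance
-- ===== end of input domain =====

-- B computes the 2-adic and 5-adic valuations by two counting loops and returns
-- 10 ** min(count2, count5), instead of A's single divide-by-10 accumulator loop (alternative decomposition).

-- ===== PORT A =====
-- the while loop; fuel n.natAbs is enough since |n| strictly shrinks each iteration
def lp10Loop : Nat → Int → Int → Int
  | 0, power, _ => power
  | f + 1, power, n =>
    if PySem.Int.mod n 10 = 0 then lp10Loop f (power * 10) (PySem.Int.floordiv n 10)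
    else power

def largest_power_of_10 (n : Int) : Int :=
  if n = 0 then 1 else lp10Loop n.natAbs 1 n

-- ===== PORT B =====
-- the counting while loop `while m % d == 0: c += 1; m //= d`
def countLoop (d : Int) : Nat → Int → Int → Int
  | 0, c, _ => c
  | f + 1, c, m =>
    if PySem.Int.mod m d = 0 then countLoop d f (c + 1) (PySem.Int.floordiv m d)
    else c

def largest_power_of_10_alt (n : Int) : Int :=
  if n = 0 then 1 else
    let count2 := countLoop 2 n.natAbs 0 n
    let count5 := countLoop 5 n.natAbs 0 n
    10 ^ (min count2 count5).toNat

-- ===== PRECONDITION & SPEC =====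
def Spec_largest_power_of_10 (n : Int) (out : Int) : Prop := out = largest_power_of_10_alt n
instance (n : Int) (out : Int) : Decidable (Spec_largest_power_of_10 n out) := by unfold Spec_largest_power_of_10; infer_instance

-- ===== CLAIM (what is proved, stated in full; the proofs are below) =====
def Claim_equal_largest_power_of_10 : Prop := ∀ (n : Int), Dom_largest_power_of_10 n → Spec_largest_power_of_10 n (largest_power_of_10 n)

-- ===== LEMMAS AND PROOFS =====

theorem pv_natAbs_ediv_lt {d n : Int} (hd : 2 ≤ d) (hn : n ≠ 0) (hdvd : d ∣ n) :
    (n / d).natAbs < n.natAbs := by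
  obtain ⟨m, rfl⟩ := hdvd
  have hd0 : d ≠ 0 := by omega
  have hm : m ≠ 0 := by rintro rfl; simp at hn
  rw [Int.mul_ediv_cancel_left _ hd0, Int.natAbs_mul]
  have h1 : 1 ≤ m.natAbs := Int.natAbs_pos.mpr hm
  have h2 : 2 ≤ d.natAbs := by omega
  nlinarith

-- d-adic valuation of n (0 for n = 0 or d < 2)
def pvV (d n : Int) : Nat :=
  if h : 2 ≤ d ∧ n ≠ 0 ∧ d ∣ n then pvV d (n / d) + 1 else 0
termination_by n.natAbs
decreasing_by exact pv_natAbs_ediv_lt h.1 h.2.1 h.2.2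

theorem pvV_of_dvd {d n : Int} (hd : 2 ≤ d) (hn : n ≠ 0) (hdvd : d ∣ n) :
    pvV d n = pvV d (n / d) + 1 := by
  rw [pvV]; exact dif_pos ⟨hd, hn, hdvd⟩

theorem pvV_of_not_dvd {d n : Int} (hdvd : ¬ d ∣ n) : pvV d n = 0 := by
  rw [pvV]; exact dif_neg (fun h => hdvd h.2.2)

theorem pv_ediv_ne_zero {d n : Int} (hn : n ≠ 0) (hd : d ≠ 0) (hdvd : d ∣ n) :
    n / d ≠ 0 := by
  obtain ⟨m, rfl⟩ := hdvd
  rw [Int.mul_ediv_cancel_left _ hd]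
  rintro rfl; simp at hn

theorem lp10Loop_eq (f : Nat) : ∀ (n p : Int), n ≠ 0 → n.natAbs ≤ f →
    lp10Loop f p n = p * 10 ^ pvV 10 n := by
  induction f with
  | zero => intro n p hn hf; omega
  | succ f ih =>
    intro n p hn hf
    by_cases h : PySem.Int.mod n 10 = 0
    · have hdvd : (10 : Int) ∣ n := (PySem.Int.mod_eq_zero_iff_dvd n 10).mp h
      have hfd : PySem.Int.floordiv n 10 = n / 10 :=
        PySem.Int.floordiv_eq_ediv_of_pos (by norm_num)
      have hn' : n / 10 ≠ 0 := pv_ediv_ne_zero hn (by norm_num) hdvd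
      have hlt : (n / 10).natAbs < n.natAbs := pv_natAbs_ediv_lt (by norm_num) hn hdvd
      simp only [lp10Loop, if_pos h, hfd]
      rw [ih (n / 10) (p * 10) hn' (by omega),
        pvV_of_dvd (by norm_num) hn hdvd, pow_succ]
      ring
    · have hdvd : ¬ (10 : Int) ∣ n := fun hd => h ((PySem.Int.mod_eq_zero_iff_dvd n 10).mpr hd)
      simp only [lp10Loop, if_neg h]
      rw [pvV_of_not_dvd hdvd]
      ring

theorem countLoop_eq (d : Int) (hd : 2 ≤ d) (f : Nat) : ∀ (n c : Int), n ≠ 0 → n.natAbs ≤ f →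
    countLoop d f c n = c + (pvV d n : Int) := by
  induction f with
  | zero => intro n c hn hf; omega
  | succ f ih =>
    intro n c hn hf
    by_cases h : PySem.Int.mod n d = 0
    · have hdvd : d ∣ n := (PySem.Int.mod_eq_zero_iff_dvd n d).mp h
      have hfd : PySem.Int.floordiv n d = n / d :=
        PySem.Int.floordiv_eq_ediv_of_pos (by omega)
      have hn' : n / d ≠ 0 := pv_ediv_ne_zero hn (by omega) hdvd
      have hlt : (n / d).natAbs < n.natAbs := pv_natAbs_ediv_lt hd hn hdvd
      simp only [countLoop, if_pos h, hfd]
      rw [ih (n / d) (c + 1) hn' (by omega), pvV_of_dvd hd hn hdvd]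
      push_cast; ring
    · have hdvd : ¬ d ∣ n := fun hh => h ((PySem.Int.mod_eq_zero_iff_dvd n d).mpr hh)
      simp only [countLoop, if_neg h]
      rw [pvV_of_not_dvd hdvd]
      push_cast; ring

theorem pvV_char : ∀ (N : Nat) (n : Int), n.natAbs ≤ N → ∀ (d : Int), 2 ≤ d → n ≠ 0 →
    d ^ pvV d n ∣ n ∧ ¬ d ^ (pvV d n + 1) ∣ n := by
  intro N
  induction N with
  | zero => intro n hN d hd hn; omega
  | succ N ih =>
    intro n hN d hd hn
    by_cases hdvd : d ∣ n
    · have hd0 : d ≠ 0 := by omega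
      have hn' : n / d ≠ 0 := pv_ediv_ne_zero hn hd0 hdvd
      have hlt : (n / d).natAbs < n.natAbs := pv_natAbs_ediv_lt hd hn hdvd
      obtain ⟨h1, h2⟩ := ih (n / d) (by omega) d hd hn'
      have hmul : n = d * (n / d) := (Int.mul_ediv_cancel' hdvd).symm
      rw [pvV_of_dvd hd hn hdvd]
      constructor
      · rw [pow_succ]
        calc d ^ pvV d (n / d) * d ∣ (n / d) * d := mul_dvd_mul_right h1 d
          _ = n := by rw [mul_comm]; exact Int.mul_ediv_cancel' hdvd
      · intro hcon
        apply h2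
        have : d * d ^ (pvV d (n / d) + 1) ∣ d * (n / d) := by
          rw [← hmul, ← pow_succ']
          exact hcon
        exact (mul_dvd_mul_iff_left hd0).mp this
    · rw [pvV_of_not_dvd hdvd]
      simpa using hdvd

theorem pv_val_unique {d n : Int} {a b : Nat}
    (ha1 : d ^ a ∣ n) (ha2 : ¬ d ^ (a + 1) ∣ n)
    (hb1 : d ^ b ∣ n) (hb2 : ¬ d ^ (b + 1) ∣ n) : a = b := by
  rcases lt_trichotomy a b with h | h | h
  · exact absurd (dvd_trans (pow_dvd_pow d (by omega : a + 1 ≤ b)) hb1) ha2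
  · exact h
  · exact absurd (dvd_trans (pow_dvd_pow d (by omega : b + 1 ≤ a)) ha1) (fun hh => hb2 hh)

theorem pvV_ten_eq_min {n : Int} (hn : n ≠ 0) :
    pvV 10 n = min (pvV 2 n) (pvV 5 n) := by
  obtain ⟨h2a, h2b⟩ := pvV_char n.natAbs n le_rfl 2 (by norm_num) hn
  obtain ⟨h5a, h5b⟩ := pvV_char n.natAbs n le_rfl 5 (by norm_num) hn
  obtain ⟨h10a, h10b⟩ := pvV_char n.natAbs n le_rfl 10 (by norm_num) hn
  set k := min (pvV 2 n) (pvV 5 n) with hk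
  have hcop : IsCoprime (2 : Int) 5 := ⟨-2, 1, by ring⟩
  have hka : (10 : Int) ^ k ∣ n := by
    have := (hcop.pow (m := k) (n := k)).mul_dvd
      (dvd_trans (pow_dvd_pow 2 (min_le_left _ _)) h2a)
      (dvd_trans (pow_dvd_pow 5 (min_le_right _ _)) h5a)
    rw [← mul_pow] at this
    norm_num at this
    exact this
  have hkb : ¬ (10 : Int) ^ (k + 1) ∣ n := by
    intro hcon
    rcases min_cases (pvV 2 n) (pvV 5 n) with ⟨hmin, _⟩ | ⟨hmin, _⟩
    · apply h2b
      rw [← hmin]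
      calc (2 : Int) ^ (k + 1) ∣ 2 ^ (k + 1) * 5 ^ (k + 1) := dvd_mul_right _ _
        _ = 10 ^ (k + 1) := by rw [← mul_pow]; norm_num
        _ ∣ n := hcon
    · apply h5b
      rw [← hmin]
      calc (5 : Int) ^ (k + 1) ∣ 2 ^ (k + 1) * 5 ^ (k + 1) := dvd_mul_left _ _
        _ = 10 ^ (k + 1) := by rw [← mul_pow]; norm_num
        _ ∣ n := hcon
  exact pv_val_unique h10a h10b hka hkb

-- ===== VERDICT (by name: the statement is the Claim_ definition above) =====
theorem largest_power_of_10_spec : Claim_equal_largest_power_of_10 := by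
  intro n _hdom
  unfold Spec_largest_power_of_10 largest_power_of_10 largest_power_of_10_alt
  by_cases hn : n = 0
  · simp [hn]
  · simp only [if_neg hn]
    rw [lp10Loop_eq n.natAbs n 1 hn le_rfl,
      countLoop_eq 2 (by norm_num) n.natAbs n 0 hn le_rfl,
      countLoop_eq 5 (by norm_num) n.natAbs n 0 hn le_rfl,
      pvV_ten_eq_min hn]
    simp [← Nat.cast_min]
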